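-- pv_equiv track=rewrite | github.com/plahteenlahti/tiras20 | bothsame.py | count
-- ===== SOURCE A (Python) =====
-- def count(s):
-- 	d = {}
-- 	for c in s:
-- 		if( d.get(c) ):
-- 			prevValue =  d[c]
-- 			d[c] = prevValue + 1
-- 		else:
-- 			d[c] = 1
--
-- 	return sum(map(lambda n: n * (n + 1) // 2,d.values()))
-- ===== SOURCE B (Python) =====
-- def count(s):
--     total = 0
--     run = 0
--     prev = None
--     for c in sorted(s):
--         if c == prev:
--             run += 1
--         else:
--             total += run * (run + 1) // 2
--             prev = c
--             run = 1
--     return total + run * (run + 1) // 2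
-- ===== Notes on version B (the rewrite author's own statement) =====
-- stated objective: alternative
-- what changed: Replaces the frequency-dictionary pass (count per key, then sum of triangular numbers over dict values) by a sort-then-run-length scan: sort the characters and accumulate n*(n+1)//2 for each run of equal characters.
import Mathlib
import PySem

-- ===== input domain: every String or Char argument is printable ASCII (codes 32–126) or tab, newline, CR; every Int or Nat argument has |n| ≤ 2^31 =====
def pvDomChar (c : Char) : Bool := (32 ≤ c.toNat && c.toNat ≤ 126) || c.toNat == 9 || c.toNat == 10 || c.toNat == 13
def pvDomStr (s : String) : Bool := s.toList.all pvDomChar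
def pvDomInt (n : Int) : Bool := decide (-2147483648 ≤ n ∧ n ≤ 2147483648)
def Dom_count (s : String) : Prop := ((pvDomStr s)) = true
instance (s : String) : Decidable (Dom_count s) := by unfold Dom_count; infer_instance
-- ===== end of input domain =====

-- B replaces A's frequency-dictionary pass by a sort-then-run-length scan (alternative decomposition, same exact results).


-- ===== PORT A =====
-- literal port: build the count dict (Python's `if d.get(c):` truthiness = lookup is neither None nor 0), then sum n*(n+1)//2 over its values
def count (s : String) : Int :=
  let d := s.toList.foldl (fun d c =>
    if ((d.get? c).getD 0) ≠ 0 then d.insert c (d.getD c 0 + 1)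
    else d.insert c 1) PySem.Dict.empty
  (d.values.map (fun n => PySem.Int.floordiv (n * (n + 1)) 2)).sum

-- ===== PORT B =====
-- one loop step of Source B: state = (prev, run, total)
def countAltStep (st : Option Char × Int × Int) (c : Char) : Option Char × Int × Int :=
  if st.1 = some c then (st.1, st.2.1 + 1, st.2.2)
  else (some c, 1, st.2.2 + PySem.Int.floordiv (st.2.1 * (st.2.1 + 1)) 2)

def count_alt (s : String) : Int :=
  let st := (PySem.List.sorted s.toList (fun c => c) false).foldl countAltStep (none, 0, 0)
  st.2.2 + PySem.Int.floordiv (st.2.1 * (st.2.1 + 1)) 2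

-- ===== PRECONDITION & SPEC =====
def Spec_count (s : String) (out : Int) : Prop := out = count_alt s
instance (s : String) (out : Int) : Decidable (Spec_count s out) := by unfold Spec_count; infer_instance

-- ===== CLAIM (what is proved, stated in full; the proofs are below) =====
def Claim_equal_count : Prop := ∀ (s : String), Dom_count s → Spec_count s (count s)

-- ===== LEMMAS AND PROOFS =====

-- n * (n + 1) // 2 as both ports compute it
def tri (n : Int) : Int := PySem.Int.floordiv (n * (n + 1)) 2

-- common specification: sum of tri over the multiplicities of the distinct elements
def runSum : List Char → Int
  | [] => 0
  | c :: t => tri (1 + (t.count c : Int)) + runSum (t.filter (fun x => !(x == c)))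
termination_by u => u.length
decreasing_by
  simp only [List.length_unattach, List.length_cons]
  exact Nat.lt_succ_of_le (le_trans (List.length_filter_le _ _) (by simp))

def fin' (st : Option Char × Int × Int) : Int := st.2.2 + tri st.2.1

-- A's dict pass computes the triangular sum over the distinct characters
theorem count_eq_sum (s : String) :
    count s = ((PySem.Set.ofList s.toList).map (fun c => tri (s.toList.count c : Int))).sum := by
  unfold count
  have hfold : s.toList.foldl (fun d c =>
        if ((d.get? c).getD 0) ≠ 0 then d.insert c (d.getD c 0 + 1)
        else d.insert c 1) (PySem.Dict.empty : PySem.Dict Char Int)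
      = s.toList.foldl (fun d c => d.insert c (d.getD c 0 + 1)) PySem.Dict.empty := by
    apply PySem.List.foldl_congr_mem
    intro d c _
    by_cases h : (d.get? c).getD 0 = 0
    · simp [h, PySem.Dict.getD_eq_get?_getD]
    · simp [h]
  rw [hfold, PySem.Dict.foldl_insert_getD_add_one_eq_counter]
  show (((PySem.Dict.counter s.toList).values).map (fun n => PySem.Int.floordiv (n * (n + 1)) 2)).sum = _
  rw [PySem.Dict.values_eq_map_keys _ (PySem.Dict.nodup_keys_counter s.toList) 0,
    PySem.Dict.keys_counter, List.map_map]
  congr 1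
  apply List.map_congr_left
  intro c _
  simp [tri, PySem.Dict.getD_counter]

-- B's loop over a sorted tail starting inside a run of p of length r so far
theorem foldl_step_sorted (t : List Char) :
    ∀ (p : Char) (r tot : Int), t.Pairwise (· ≤ ·) → (∀ x ∈ t, p ≤ x) →
    fin' (t.foldl countAltStep (some p, r, tot))
    = tot + tri (r + (t.count p : Int)) + runSum (t.filter (fun x => !(x == p))) := by
  induction t with
  | nil => intro p r tot _ _; simp [fin', runSum, tri]
  | cons c t ih =>
    intro p r tot hpw hge
    have hpw' := (List.pairwise_cons.mp hpw).2
    have hhead := (List.pairwise_cons.mp hpw).1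
    by_cases hcp : c = p
    · subst hcp
      rw [List.foldl_cons,
        show countAltStep (some c, r, tot) c = (some c, r + 1, tot) from by simp [countAltStep],
        ih c (r + 1) tot hpw' hhead]
      simp only [List.count_cons_self, List.filter_cons, show (!(c == c)) = false from by simp]
      push_cast
      ring_nf
    · have hpc : p < c := lt_of_le_of_ne (hge c (by simp)) (fun h => hcp h.symm)
      have hpt : ∀ x ∈ t, p < x := fun x hx => lt_of_lt_of_le hpc (hhead x hx)
      rw [List.foldl_cons,
        show countAltStep (some p, r, tot) c
            = (some c, 1, tot + PySem.Int.floordiv (r * (r + 1)) 2) from by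
          unfold countAltStep
          rw [if_neg (fun h => hcp (Option.some.inj h).symm)],
        ih c 1 (tot + PySem.Int.floordiv (r * (r + 1)) 2) hpw' hhead]
      have hc0 : t.count p = 0 := List.count_eq_zero.mpr (fun h => lt_irrefl p (hpt p h))
      have hfilt : t.filter (fun x => !(x == p)) = t := by
        apply List.filter_eq_self.mpr
        intro x hx
        simp [ne_of_gt (hpt x hx)]
      simp only [List.count_cons, hc0, hfilt, List.filter_cons,
        show (c == p) = false from beq_false_of_ne hcp, Bool.not_false, Bool.false_eq_true, if_true, if_false]
      rw [show runSum (c :: t) = tri (1 + (t.count c : Int)) + runSum (t.filter (fun x => !(x == c))) from by rw [runSum.eq_def]]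
      simp only [tri]
      ring_nf

-- the run specification equals the triangular sum over the distinct elements (any list)
theorem runSum_eq_sum (u : List Char) :
    runSum u = ((PySem.Set.ofList u).map (fun c => tri (u.count c : Int))).sum := by
  induction u using runSum.induct with
  | case1 => simp [runSum, PySem.Set.ofList_nil]
  | case2 c t ih =>
    simp only [List.unattach_filter, List.unattach_attach] at ih
    rw [show runSum (c :: t) = tri (1 + (t.count c : Int)) + runSum (t.filter (fun x => !(x == c))) from by rw [runSum.eq_def],
      ih, PySem.Set.ofList_cons]
    simp only [List.map_cons, List.sum_cons, List.count_cons_self]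
    congr 1
    · congr 1; push_cast; ring
    · have hmcongr : (PySem.Set.ofList (t.filter (fun x => !(x == c)))).map
            (fun d => tri ((t.filter (fun x => !(x == c))).count d : Int))
          = (PySem.Set.ofList (t.filter (fun x => !(x == c)))).map
            (fun d => tri ((c :: t).count d : Int)) := by
        apply List.map_congr_left
        intro d hd
        have hd' := (PySem.Set.mem_ofList _ _).mp hd
        have hdc : (d == c) = false := by
          have := (List.mem_filter.mp hd').2
          simpa using this
        have hdc' : d ≠ c := by simpa using hdc
        rw [List.count_filter, List.count_cons]
        · simp [show (c == d) = false from beq_false_of_ne (fun h => hdc' h.symm)]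
        · simp [hdc]
      rw [hmcongr]
      have hperm : (PySem.Set.ofList (t.filter (fun x => !(x == c)))).Perm
          (PySem.Set.discard (PySem.Set.ofList t) c) := by
        rw [List.perm_ext_iff_of_nodup (PySem.Set.nodup_ofList _)
          (PySem.Set.nodup_discard _ _ (PySem.Set.nodup_ofList _))]
        intro d
        rw [PySem.Set.mem_ofList, List.mem_filter, PySem.Set.mem_discard, PySem.Set.mem_ofList]
        simp
      exact (hperm.map _).sum_eq

-- B equals the same triangular sum: run the loop over the sorted list, then move the sum back along the permutation
theorem count_alt_eq_sum (s : String) :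
    count_alt s = ((PySem.Set.ofList s.toList).map (fun c => tri (s.toList.count c : Int))).sum := by
  unfold count_alt
  have hperm : (PySem.List.sorted s.toList (fun c => c) false).Perm s.toList :=
    PySem.List.sorted_perm _ _ _
  have hrun : (let st := (PySem.List.sorted s.toList (fun c => c) false).foldl countAltStep (none, 0, 0)
      st.2.2 + PySem.Int.floordiv (st.2.1 * (st.2.1 + 1)) 2)
      = runSum (PySem.List.sorted s.toList (fun c => c) false) := by
    have hpw : (PySem.List.sorted s.toList (fun c => c) false).Pairwise (· ≤ ·) := by
      simpa using PySem.List.sorted_pairwise s.toList (fun c => c)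
    cases h : PySem.List.sorted s.toList (fun c => c) false with
    | nil => simp [runSum, PySem.Int.floordiv]
    | cons c t =>
      rw [h] at hpw
      have hpw' := (List.pairwise_cons.mp hpw).2
      have hhead := (List.pairwise_cons.mp hpw).1
      simp only [List.foldl_cons,
        show countAltStep (none, 0, 0) c = (some c, 1, 0 + PySem.Int.floordiv (0 * (0 + 1)) 2) from by
          simp [countAltStep]]
      have := foldl_step_sorted t c 1 (0 + PySem.Int.floordiv (0 * (0 + 1)) 2) hpw' hhead
      unfold fin' at this
      rw [show (0 : Int) + PySem.Int.floordiv (0 * (0 + 1)) 2 = 0 from by decide] at this ⊢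
      rw [show PySem.Int.floordiv
          ((List.foldl countAltStep (some c, 1, 0) t).2.1 * ((List.foldl countAltStep (some c, 1, 0) t).2.1 + 1)) 2
          = tri (List.foldl countAltStep (some c, 1, 0) t).2.1 from rfl, this,
        show runSum (c :: t) = tri (1 + (t.count c : Int)) + runSum (t.filter (fun x => !(x == c))) from by rw [runSum.eq_def]]
      simp [tri]
  rw [hrun, runSum_eq_sum]
  have hcongr : (PySem.Set.ofList (PySem.List.sorted s.toList (fun c => c) false)).map
        (fun c => tri ((PySem.List.sorted s.toList (fun c => c) false).count c : Int))
      = (PySem.Set.ofList (PySem.List.sorted s.toList (fun c => c) false)).map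
        (fun c => tri (s.toList.count c : Int)) := by
    apply List.map_congr_left
    intro d _
    rw [hperm.count_eq]
  rw [hcongr]
  have hsetperm : (PySem.Set.ofList (PySem.List.sorted s.toList (fun c => c) false)).Perm
      (PySem.Set.ofList s.toList) := by
    rw [List.perm_ext_iff_of_nodup (PySem.Set.nodup_ofList _) (PySem.Set.nodup_ofList _)]
    intro d
    rw [PySem.Set.mem_ofList, PySem.Set.mem_ofList]
    exact ⟨fun h => hperm.mem_iff.mp h, fun h => hperm.mem_iff.mpr h⟩
  exact (hsetperm.map _).sum_eq

-- ===== VERDICT (by name: the statement is the Claim_ definition above) =====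
theorem count_spec : Claim_equal_count := by
  intro s _
  unfold Spec_count
  rw [count_eq_sum, count_alt_eq_sum]
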